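-- pv_equiv track=rewrite | github.com/venkatraman-arumugam/AdaBL-GL | GloBug/globug_bl_data_processing/sc_glob_pysparl_prcessing.py | code_splitter
-- ===== SOURCE A (Python) =====
-- def code_splitter(sourceCode):
--     """
--     @Receives: a code
--     @Process: splits it same as described in BugLocator
--     @Return: a list of lower cased words
--     """
--     contentBuf = []
--     wordBuf = []
--     for char in sourceCode:
--         if ((char >= 'a' and char <= 'z') or (char >= 'A' and char <= 'Z')):
--             wordBuf.append(char)
--             continue
--         length = len(wordBuf)
--         if (length != 0):
--             k = 0
--             for i in range(length-1):
--                 j=i+1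
--                 first_char = wordBuf[i]
--                 second_char = wordBuf[j]
--                 if ((first_char >= 'A' and first_char <= 'Z') and (second_char >= 'a' and second_char <= 'z')):
--                     contentBuf.append(wordBuf[k:i])
--                     contentBuf.append(' ')
--                     k = i
--                     continue
--                 if ((first_char >= 'a' and first_char <= 'z') and (second_char >= 'A' and second_char <= 'Z')):
--                     contentBuf.append(wordBuf[k:j])
--                     contentBuf.append(' ')
--                     k = j
--                     continue
--             if (k < length):
--                 contentBuf.append(wordBuf[k:])
--                 contentBuf.append(" ")
--             wordBuf=[]
--     words=''
--     for each in contentBuf: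
--         if isinstance(each,str):
--             words+=each
--         else:
--             for term in each:
--                 words+=term
--     words= words.split()
--     contentBuf = []
--     for i in range(len(words)):
--         if (words[i].strip()!="" and len(words[i]) >= 2):
--             contentBuf.append(words[i])
--     return contentBuf
-- ===== SOURCE B (Python) =====
-- def _is_upper(c):
--     return 'A' <= c <= 'Z'
--
--
-- def _is_lower(c):
--     return 'a' <= c <= 'z'
--
--
-- def _is_letter(c):
--     return _is_lower(c) or _is_upper(c)
--
--
-- def _camel(run):
--     # cut before an upper-case letter that borders a lower-case one
--     cuts = [p for p in range(1, len(run))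
--             if _is_upper(run[p]) and (_is_lower(run[p - 1])
--                                       or (p + 1 < len(run) and _is_lower(run[p + 1])))]
--     bounds = [0] + cuts + [len(run)]
--     return [run[a:b] for a, b in zip(bounds, bounds[1:]) if b - a >= 2]
--
--
-- def code_splitter(sourceCode):
--     """A word is a maximal ASCII-letter run terminated by a non-letter
--     character; each word is split at camelCase boundaries and the pieces
--     of at least two letters are returned, in order."""
--     tokens = []
--     run_start = 0
--     for i in range(len(sourceCode)):
--         if not _is_letter(sourceCode[i]):
--             if run_start < i:
--                 tokens += _camel(sourceCode[run_start:i])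
--             run_start = i + 1
--     return tokens
-- ===== Notes on version B (the rewrite author's own statement) =====
-- stated objective: simpler
-- what changed: B is a short single pass that slices out each delimiter-terminated letter run and splits it at camelCase cut positions computed by one comprehension, instead of A's character state machine that interleaves pieces and spaces into a content buffer, concatenates everything into one string, re-splits it on whitespace and filters in a final index loop.
import Mathlib
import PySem

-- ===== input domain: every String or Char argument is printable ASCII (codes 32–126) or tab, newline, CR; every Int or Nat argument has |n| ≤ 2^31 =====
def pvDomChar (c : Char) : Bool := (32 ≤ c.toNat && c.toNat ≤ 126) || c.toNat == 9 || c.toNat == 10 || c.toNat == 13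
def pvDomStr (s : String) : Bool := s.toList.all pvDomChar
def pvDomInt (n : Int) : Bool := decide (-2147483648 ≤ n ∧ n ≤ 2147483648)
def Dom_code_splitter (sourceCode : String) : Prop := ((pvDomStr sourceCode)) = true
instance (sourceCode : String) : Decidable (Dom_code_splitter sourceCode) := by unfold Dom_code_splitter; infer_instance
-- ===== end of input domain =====

-- B replaces A's buffer/join/re-split pipeline by a short single pass that slices out each
-- delimiter-terminated letter run and camel-splits it; same return value, simpler structure.

-- ===== PORT A =====
-- 'a' <= char <= 'z' / 'A' <= char <= 'Z' tests of the Python source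
def pvIsLow (c : Char) : Bool := decide ('a' ≤ c) && decide (c ≤ 'z')
def pvIsUp (c : Char) : Bool := decide ('A' ≤ c) && decide (c ≤ 'Z')
def pvIsLetter (c : Char) : Bool := pvIsLow c || pvIsUp c

-- body of A's inner 'for i in range(length-1)' loop; state = (contentBuf, k)
def pvInnerA (w : List Char) (p : List (List Char) × Int) (i : Int) : List (List Char) × Int :=
  let j := i + 1
  let fc := PySem.List.pyGetD w i ' '
  let sc := PySem.List.pyGetD w j ' '
  if pvIsUp fc && pvIsLow sc then (p.1 ++ [PySem.List.slice w (some p.2) (some i), [' ']], i)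
  else if pvIsLow fc && pvIsUp sc then (p.1 ++ [PySem.List.slice w (some p.2) (some j), [' ']], j)
  else p

-- body of A's 'for char in sourceCode' loop; state = (contentBuf, wordBuf)
def pvStepA (st : List (List Char) × List Char) (c : Char) : List (List Char) × List Char :=
  if pvIsLetter c then (st.1, st.2 ++ [c])
  else
    let w := st.2
    if w.length ≠ 0 then
      let inner := (PySem.List.pyRange 0 ((w.length : Int) - 1)).foldl (pvInnerA w) (st.1, 0)
      let cB :=
        if inner.2 < (w.length : Int) then
          inner.1 ++ [PySem.List.slice w (some inner.2) none, [' ']]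
        else inner.1
      (cB, [])
    else st

def code_splitter (sourceCode : String) : List String :=
  let st := sourceCode.toList.foldl pvStepA ([], [])
  -- the words-building loop concatenates the characters of every contentBuf entry (str and list alike)
  let words : List Char := st.1.foldl (fun acc each => acc ++ each) []
  let ws := PySem.Chars.split₀ words
  ((PySem.List.pyRange 0 (ws.length : Int)).foldl
    (fun acc i =>
      let wi := PySem.List.pyGetD ws i []
      if !(PySem.Chars.strip wi).isEmpty && decide (2 ≤ wi.length) then acc ++ [wi] else acc)
    []).map (fun t => String.ofList t)

-- ===== PORT B =====
-- _camel: cut positions as a comprehension, then the slices between consecutive bounds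
def pvCamelB (run : List Char) : List (List Char) :=
  let n : Int := run.length
  let cuts := (PySem.List.pyRange 1 n).filter (fun p =>
      pvIsUp (PySem.List.pyGetD run p ' ') &&
      (pvIsLow (PySem.List.pyGetD run (p - 1) ' ') ||
       (decide (p + 1 < n) && pvIsLow (PySem.List.pyGetD run (p + 1) ' '))))
  let bounds := 0 :: (cuts ++ [n])
  ((bounds.zip bounds.tail).filter (fun ab => decide (2 ≤ ab.2 - ab.1))).map
    (fun ab => PySem.List.slice run (some ab.1) (some ab.2))

-- body of B's 'for i in range(len(sourceCode))' loop; state = (tokens, run_start);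
-- i is always in range, so sourceCode[i] is exact via pyGetD
def pvStepB (ls : List Char) (st : List (List Char) × Int) (i : Int) : List (List Char) × Int :=
  if !pvIsLetter (PySem.List.pyGetD ls i ' ') then
    ((if st.2 < i then st.1 ++ pvCamelB (PySem.List.slice ls (some st.2) (some i)) else st.1), i + 1)
  else st

def code_splitter_alt (sourceCode : String) : List String :=
  (((PySem.List.pyRange 0 (sourceCode.toList.length : Int)).foldl
      (pvStepB sourceCode.toList) ([], 0)).1).map (fun t => String.ofList t)

-- ===== PRECONDITION & SPEC =====
def Spec_code_splitter (sourceCode : String) (out : List String) : Prop := out = code_splitter_alt sourceCode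
instance (sourceCode : String) (out : List String) : Decidable (Spec_code_splitter sourceCode out) := by unfold Spec_code_splitter; infer_instance

-- ===== CLAIM (what is proved, stated in full; the proofs are below) =====
def Claim_equal_code_splitter : Prop := ∀ (sourceCode : String), Dom_code_splitter sourceCode → Spec_code_splitter sourceCode (code_splitter sourceCode)

-- ===== LEMMAS AND PROOFS =====

-- proof-side vocabulary: Nat-indexed segments, a recursive scanner over delimiter-terminated
-- runs, events of A's inner loop, cut positions of B
def pvSeg (w : List Char) (a b : Nat) : List Char := (w.drop a).take (b - a)
def pvScanB : List Char → List (List Char)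
  | [] => []
  | c :: tl =>
    if pvIsLetter c then
      if (tl.dropWhile pvIsLetter).isEmpty then []
      else pvCamelB (c :: tl.takeWhile pvIsLetter) ++ pvScanB (tl.dropWhile pvIsLetter)
    else pvScanB tl
termination_by l => l.length
decreasing_by
· exact Nat.lt_succ_of_le (List.length_dropWhile_le _ _)
· simp
def pvNStepB (ls : List Char) (st : List (List Char) × Nat) (i : Nat) : List (List Char) × Nat :=
  if pvIsLetter (ls.getD i ' ') then st
  else ((if st.2 < i then st.1 ++ pvCamelB (pvSeg ls st.2 i) else st.1), i + 1)
def pvU (w : List Char) (i : Nat) : Bool := pvIsUp (w.getD i ' ')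
def pvLo (w : List Char) (i : Nat) : Bool := pvIsLow (w.getD i ' ')
def pvEvt (w : List Char) (i : Nat) : Option Nat :=
  if pvU w i && pvLo w (i + 1) then some i
  else if pvLo w i && pvU w (i + 1) then some (i + 1)
  else none
def pvNStep (w : List Char) (p : List (List Char) × Nat) (i : Nat) : List (List Char) × Nat :=
  if pvU w i && pvLo w (i + 1) then (p.1 ++ [pvSeg w p.2 i], i)
  else if pvLo w i && pvU w (i + 1) then (p.1 ++ [pvSeg w p.2 (i + 1)], i + 1)
  else p
def pvSegStep (w : List Char) (p : List (List Char) × Nat) (c : Nat) : List (List Char) × Nat :=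
  (p.1 ++ [pvSeg w p.2 c], c)
def pvMark (P : List (List Char)) : List (List Char) := P.flatMap (fun p => [p, [' ']])
def pvFlushN (w : List Char) : List (List Char) × Nat :=
  (List.range (w.length - 1)).foldl (pvNStep w) ([], 0)
def pvFinish (w : List Char) (r : List (List Char) × Nat) : List (List Char) :=
  if r.2 < w.length then r.1 ++ [pvSeg w r.2 w.length] else r.1
def pvPieces (w : List Char) : List (List Char) := pvFinish w (pvFlushN w)
def pvEvents (w : List Char) : List Nat := (List.range (w.length - 1)).filterMap (pvEvt w)
def pvCutP (w : List Char) (p : Nat) : Bool :=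
  pvU w p && (pvLo w (p - 1) || (decide (p + 1 < w.length) && pvLo w (p + 1)))
def pvCuts (w : List Char) : List Nat := (List.range' 1 (w.length - 1)).filter (pvCutP w)
def pvSegsFrom (w : List Char) : Nat → List Nat → List (List Char)
  | k, [] => if 2 ≤ w.length - k then [pvSeg w k w.length] else []
  | k, c :: E => (if 2 ≤ c - k then [pvSeg w k c] else []) ++ pvSegsFrom w c E
def pvNorm : Nat → List Nat → List Nat
  | _, [] => []
  | k, c :: E => if c ≤ k then pvNorm k E else c :: pvNorm c E
def pvLen2 (t : List Char) : Bool := decide (2 ≤ t.length)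

-- character-class facts
theorem pv_low_not_up (c : Char) (h : pvIsLow c = true) : pvIsUp c = false := by
  simp only [pvIsLow, pvIsUp, Bool.and_eq_true, decide_eq_true_eq, Char.le_def,
    UInt32.le_iff_toNat_le] at h ⊢
  have h1 : ('a':Char).val.toNat = 97 := by decide
  have h2 : ('z':Char).val.toNat = 122 := by decide
  have h3 : ('A':Char).val.toNat = 65 := by decide
  have h4 : ('Z':Char).val.toNat = 90 := by decide
  simp only [h1, h2, h3, h4] at h ⊢
  simp only [Bool.and_eq_false_iff, decide_eq_false_iff_not]
  omega
theorem pv_letter_not_space (c : Char) (h : pvIsLetter c = true) : PySem.Chars.isspace c = false := by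
  have h1 : ('a':Char).val.toNat = 97 := by decide
  have h2 : ('z':Char).val.toNat = 122 := by decide
  have h3 : ('A':Char).val.toNat = 65 := by decide
  have h4 : ('Z':Char).val.toNat = 90 := by decide
  simp only [pvIsLetter, pvIsLow, pvIsUp, Bool.or_eq_true, Bool.and_eq_true, decide_eq_true_eq,
    Char.le_def, UInt32.le_iff_toNat_le, h1, h2, h3, h4] at h
  simp only [PySem.Chars.isspace, Char.toNat]
  simp only [Bool.or_eq_false_iff, Bool.and_eq_false_iff, decide_eq_false_iff_not]
  omega

-- split₀ over letter pieces interleaved with single spaces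
theorem pv_go_nonspace (p : List Char) (hp : ∀ c ∈ p, PySem.Chars.isspace c = false) :
    ∀ rest cur acc, PySem.Chars.split₀.go (p ++ rest) cur acc = PySem.Chars.split₀.go rest (p.reverse ++ cur) acc := by
  induction p with
  | nil => intro rest cur acc; simp
  | cons c p ih =>
    intro rest cur acc
    have hc : PySem.Chars.isspace c = false := hp c (by simp)
    have hp' : ∀ c ∈ p, PySem.Chars.isspace c = false := fun c hcm => hp c (by simp [hcm])
    simp only [List.cons_append, PySem.Chars.split₀.go, hc, Bool.false_eq_true, if_false]
    rw [ih hp' rest (c :: cur) acc]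
    simp
theorem pv_go_interleave (P : List (List Char)) (hP : ∀ p ∈ P, ∀ c ∈ p, PySem.Chars.isspace c = false) :
    ∀ acc, PySem.Chars.split₀.go (P.flatMap (fun p => p ++ [' '])) [] acc = acc.reverse ++ P.filter (fun p => !p.isEmpty) := by
  induction P with
  | nil => intro acc; simp [PySem.Chars.split₀.go]
  | cons p P ih =>
    intro acc
    have hp : ∀ c ∈ p, PySem.Chars.isspace c = false := hP p (by simp)
    have hP' : ∀ q ∈ P, ∀ c ∈ q, PySem.Chars.isspace c = false := fun q hq => hP q (by simp [hq])
    have hsp : PySem.Chars.isspace ' ' = true := by decide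
    simp only [List.flatMap_cons, List.append_assoc, List.singleton_append]
    rw [pv_go_nonspace p hp _ [] acc]
    simp only [PySem.Chars.split₀.go, hsp, if_true, List.append_nil]
    by_cases hpe : p = []
    · subst hpe
      simp only [List.reverse_nil, List.isEmpty_nil, if_true]
      rw [ih hP' acc]
      simp
    · have : p.reverse.isEmpty = false := by simp [hpe]
      simp only [this, Bool.false_eq_true, if_false, List.reverse_reverse]
      rw [ih hP' (p :: acc)]
      simp [hpe]
theorem pv_mark_flatten (P : List (List Char)) : (pvMark P).flatten = P.flatMap (fun p => p ++ [' ']) := by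
  induction P with
  | nil => simp [pvMark]
  | cons p P ih => simp [pvMark] at ih ⊢; simp [ih]
theorem pv_split_mark (P : List (List Char)) (hP : ∀ p ∈ P, ∀ c ∈ p, pvIsLetter c = true) :
    PySem.Chars.split₀ ((pvMark P).flatten) = P.filter (fun p => !p.isEmpty) := by
  have hns : ∀ p ∈ P, ∀ c ∈ p, PySem.Chars.isspace c = false :=
    fun p hp c hc => pv_letter_not_space c (hP p hp c hc)
  rw [pv_mark_flatten]
  show PySem.Chars.split₀.go _ [] [] = _
  rw [pv_go_interleave P hns []]
  simp

-- strip is the identity on all-letter tokens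
theorem pv_strip_letters (t : List Char) (ht : ∀ c ∈ t, pvIsLetter c = true) : PySem.Chars.strip t = t := by
  have hns : ∀ c ∈ t, PySem.Chars.isspace c = false :=
    fun c hc => pv_letter_not_space c (ht c hc)
  have hl : PySem.Chars.lstrip t = t := by
    cases t with
    | nil => rfl
    | cons c tl => simp [PySem.Chars.lstrip, hns c (by simp)]
  have hr : PySem.Chars.rstrip t = t := by
    cases hrev : t.reverse with
    | nil => simp [PySem.Chars.rstrip, List.reverse_eq_nil_iff.mp hrev]
    | cons c tl =>
      have hc : c ∈ t := by
        have : c ∈ t.reverse := by simp [hrev]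
        simpa using this
      simp only [PySem.Chars.rstrip, hrev, List.dropWhile_cons, hns c hc, Bool.false_eq_true, if_false]
      rw [← hrev, List.reverse_reverse]
  simp [PySem.Chars.strip, hl, hr]
theorem pv_filters_collapse (Q : List (List Char)) (hQ : ∀ p ∈ Q, ∀ c ∈ p, pvIsLetter c = true) :
    (Q.filter (fun p => !p.isEmpty)).filter (fun t => !(PySem.Chars.strip t).isEmpty && decide (2 ≤ t.length)) = Q.filter pvLen2 := by
  rw [List.filter_filter]
  apply List.filter_congr
  intro t ht
  have hlt : ∀ c ∈ t, pvIsLetter c = true := hQ t ht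
  rw [pv_strip_letters t hlt]
  by_cases h2 : 2 ≤ t.length
  · have hne : t.isEmpty = false := by
      cases t with
      | nil => simp at h2
      | cons a tl => simp
    simp [pvLen2, hne, h2]
  · simp [pvLen2, h2]

-- A's inner loop at Nat level
theorem pv_innerA_bridge (w : List Char) :
    ∀ (l : List Nat) (C P : List (List Char)) (k : Nat),
      l.foldl (fun (p : List (List Char) × Int) (i : Nat) => pvInnerA w p (i : Int)) (C ++ pvMark P, (k : Int)) =
        (C ++ pvMark ((l.foldl (pvNStep w) (P, k)).1), ((l.foldl (pvNStep w) (P, k)).2 : Int)) := by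
  intro l
  induction l with
  | nil => intro C P k; simp
  | cons i l ih =>
    intro C P k
    simp only [List.foldl_cons]
    have hstep : pvInnerA w (C ++ pvMark P, (k : Int)) (i : Int) =
        (C ++ pvMark ((pvNStep w (P, k) i).1), ((pvNStep w (P, k) i).2 : Int)) := by
      have hcast : (i : Int) + 1 = ((i + 1 : Nat) : Int) := by push_cast; ring
      simp only [pvInnerA, pvNStep, pvU, pvLo, hcast, PySem.List.pyGetD_natCast,
        PySem.List.slice_natCast, List.getD_eq_getElem?_getD]
      split_ifs <;> simp [pvMark, pvSeg]
    rw [hstep]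
    rcases hst : pvNStep w (P, k) i with ⟨P', k'⟩
    simpa using ih C P' k'

theorem pv_stepA_flush (P : List (List Char)) (w : List Char) (c : Char)
    (hc : pvIsLetter c = false) (hw : w ≠ []) :
    pvStepA (pvMark P, w) c = (pvMark (P ++ pvPieces w), []) := by
  have hlen : w.length ≠ 0 := by simpa using hw
  have hlen1 : ((w.length : Int) - 1) = ((w.length - 1 : Nat) : Int) := by omega
  simp only [pvStepA, hc, Bool.false_eq_true, if_false, hlen, ne_eq, not_false_iff, if_true]
  rw [hlen1, PySem.List.pyRange_zero_natCast, List.foldl_map]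
  have hinit : (pvMark P, (0 : Int)) = (pvMark P ++ pvMark [], ((0 : Nat) : Int)) := by
    simp [pvMark]
  rw [hinit, pv_innerA_bridge w (List.range (w.length - 1)) (pvMark P) [] 0]
  rcases hfl : (List.range (w.length - 1)).foldl (pvNStep w) ([], 0) with ⟨Pc, kc⟩
  have hfl' : pvFlushN w = (Pc, kc) := by rw [pvFlushN, hfl]
  have hiff : ((kc : Int) < (w.length : Int)) ↔ kc < w.length := by exact_mod_cast Iff.rfl
  by_cases hk : kc < w.length
  · rw [if_pos (hiff.mpr hk)]
    rw [PySem.List.slice_from_natCast]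
    have hseg : w.drop kc = pvSeg w kc w.length := by
      simp only [pvSeg]
      rw [List.take_of_length_le (by simp)]
    rw [hseg]
    simp only [pvPieces, pvFinish, hfl', hk, if_true]
    simp [pvMark]
  · rw [if_neg (by simpa [hiff] using hk)]
    simp only [pvPieces, pvFinish, hfl', hk, if_false]
    simp [pvMark]

-- pieces consist of letters of w
theorem pv_foldN_letters (w : List Char) (hw : ∀ c ∈ w, pvIsLetter c = true) :
    ∀ (l : List Nat) (P : List (List Char)) (k : Nat), (∀ p ∈ P, ∀ c ∈ p, pvIsLetter c = true) →
      ∀ p ∈ (l.foldl (pvNStep w) (P, k)).1, ∀ c ∈ p, pvIsLetter c = true := by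
  have hstep : ∀ (P : List (List Char)) (k i : Nat), (∀ p ∈ P, ∀ c ∈ p, pvIsLetter c = true) →
      ∀ p ∈ (pvNStep w (P, k) i).1, ∀ c ∈ p, pvIsLetter c = true := by
    intro P k i hP p hp c hc
    simp only [pvNStep] at hp
    split_ifs at hp <;> simp only [List.mem_append, List.mem_singleton] at hp
    · rcases hp with h | h
      · exact hP p h c hc
      · subst h
        exact hw c (List.mem_of_mem_drop (List.mem_of_mem_take hc))
    · rcases hp with h | h
      · exact hP p h c hc
      · subst h
        exact hw c (List.mem_of_mem_drop (List.mem_of_mem_take hc))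
    · exact hP p hp c hc
  intro l
  induction l with
  | nil => intro P k hP; simpa using hP
  | cons i l ih =>
    intro P k hP
    simp only [List.foldl_cons]
    rcases hst : pvNStep w (P, k) i with ⟨P', k'⟩
    have := hstep P k i hP
    rw [hst] at this
    exact ih P' k' this

theorem pv_pieces_letters (w : List Char) (hw : ∀ c ∈ w, pvIsLetter c = true) :
    ∀ p ∈ pvPieces w, ∀ c ∈ p, pvIsLetter c = true := by
  intro p hp c hc
  simp only [pvPieces, pvFinish] at hp
  have hfold := pv_foldN_letters w hw (List.range (w.length - 1)) [] 0 (by simp)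
  split_ifs at hp with h
  · rcases List.mem_append.mp hp with h' | h'
    · exact hfold p h' c hc
    · simp at h'; subst h'
      simp only [pvSeg] at hc
      exact hw c (List.mem_of_mem_drop (List.mem_of_mem_take hc))
  · exact hfold p hp c hc

-- the inner loop only acts on events
theorem pv_foldN_eq_seg (w : List Char) (l : List Nat) (P : List (List Char)) (k : Nat) :
    l.foldl (pvNStep w) (P, k) = (l.filterMap (pvEvt w)).foldl (pvSegStep w) (P, k) := by
  rw [List.foldl_filterMap]
  apply PySem.List.foldl_congr_mem
  intro acc i _
  simp only [pvNStep, pvEvt, pvSegStep]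
  split_ifs <;> rfl
theorem pv_segfold_acc (w : List Char) :
    ∀ (E : List Nat) (P : List (List Char)) (k : Nat),
      E.foldl (pvSegStep w) (P, k) = (P ++ (E.foldl (pvSegStep w) ([], k)).1, (E.foldl (pvSegStep w) ([], k)).2) := by
  intro E
  induction E with
  | nil => intro P k; simp
  | cons c E ih =>
    intro P k
    simp only [List.foldl_cons, pvSegStep, List.nil_append]
    rw [ih (P ++ [pvSeg w k c]) c, ih [pvSeg w k c] c]
    simp

-- events are non-decreasing and in range
theorem pv_evt_bounds (w : List Char) (i v : Nat) (h : pvEvt w i = some v) : i ≤ v ∧ v ≤ i + 1 := by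
  simp only [pvEvt] at h
  split_ifs at h <;> simp at h <;> omega

theorem pv_events_pairwise (w : List Char) : (pvEvents w).Pairwise (· ≤ ·) := by
  unfold pvEvents
  rw [List.pairwise_filterMap]
  apply List.Pairwise.imp _ (List.pairwise_lt_range (n := w.length - 1))
  intro a b hab v hv v' hv'
  have h1 := pv_evt_bounds w a v hv
  have h2 := pv_evt_bounds w b v' hv'
  omega

theorem pv_events_lt (w : List Char) : ∀ x ∈ pvEvents w, x < w.length := by
  intro x hx
  simp only [pvEvents, List.mem_filterMap, List.mem_range] at hx
  obtain ⟨i, hi, hev⟩ := hx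
  have := pv_evt_bounds w i x hev
  omega

theorem pv_mem_events (w : List Char) (p : Nat) :
    p ∈ pvEvents w ↔ ∃ i, i < w.length - 1 ∧ pvEvt w i = some p := by
  simp [pvEvents, List.mem_filterMap, List.mem_range]

theorem pv_seg_length (w : List Char) (a b : Nat) (hb : b ≤ w.length) : (pvSeg w a b).length = b - a := by
  simp only [pvSeg, List.length_take, List.length_drop]
  omega

-- A's flushed pieces, filtered, are the segments along the event list
theorem pv_segfold_segsFrom (w : List Char) :
    ∀ (E : List Nat) (k : Nat), k < w.length → (∀ x ∈ E, x < w.length) → E.Pairwise (· ≤ ·) → (∀ x ∈ E, k ≤ x) →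
      (pvFinish w (E.foldl (pvSegStep w) ([], k))).filter pvLen2 = pvSegsFrom w k E := by
  intro E
  induction E with
  | nil =>
    intro k hk _ _ _
    simp only [List.foldl_nil, pvFinish, hk, if_true, pvSegsFrom]
    by_cases h2 : 2 ≤ w.length - k
    · rw [if_pos h2]
      simp [pvLen2, pv_seg_length w k w.length le_rfl, h2]
    · rw [if_neg h2]
      simp [pvLen2, pv_seg_length w k w.length le_rfl, h2]
  | cons c E ih =>
    intro k hk hlt hpw hge
    have hc : c < w.length := hlt c (by simp)
    have hpw' := (List.pairwise_cons.mp hpw).2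
    have hcle := (List.pairwise_cons.mp hpw).1
    simp only [List.foldl_cons, pvSegStep, List.nil_append]
    rw [pv_segfold_acc w E [pvSeg w k c] c]
    have hfin : pvFinish w ([pvSeg w k c] ++ (E.foldl (pvSegStep w) ([], c)).1, (E.foldl (pvSegStep w) ([], c)).2)
        = [pvSeg w k c] ++ pvFinish w (E.foldl (pvSegStep w) ([], c)) := by
      simp only [pvFinish]
      split_ifs <;> simp
    rw [hfin, List.filter_append]
    rw [ih c hc (fun x hx => hlt x (by simp [hx])) hpw' hcle]
    have hlen : pvLen2 (pvSeg w k c) = decide (2 ≤ c - k) := by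
      simp [pvLen2, pv_seg_length w k c (le_of_lt hc)]
    simp only [pvSegsFrom]
    by_cases h2 : 2 ≤ c - k
    · simp [hlen, h2]
    · have hfalse : pvLen2 (pvSeg w k c) = false := by rw [hlen]; simp [h2]
      simp [hfalse, h2]

theorem pv_pieces_filter (w : List Char) (hw : w ≠ []) :
    (pvPieces w).filter pvLen2 = pvSegsFrom w 0 (pvEvents w) := by
  have h0 : 0 < w.length := by
    cases w with
    | nil => exact absurd rfl hw
    | cons a tl => simp
  unfold pvPieces pvFlushN
  rw [pv_foldN_eq_seg]
  exact pv_segfold_segsFrom w (pvEvents w) 0 h0 (pv_events_lt w) (pv_events_pairwise w) (fun x _ => Nat.zero_le x)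

-- normalisation: duplicates and too-small cut positions are invisible to pvSegsFrom
theorem pv_segsFrom_norm (w : List Char) :
    ∀ (E : List Nat) (k : Nat), E.Pairwise (· ≤ ·) → (∀ x ∈ E, k ≤ x) →
      pvSegsFrom w k E = pvSegsFrom w k (pvNorm k E) := by
  intro E
  induction E with
  | nil => intro k _ _; simp [pvNorm]
  | cons c E ih =>
    intro k hpw hge
    have hkc : k ≤ c := hge c (by simp)
    have hpw' := (List.pairwise_cons.mp hpw).2
    have hcle := (List.pairwise_cons.mp hpw).1
    by_cases hck : c ≤ k
    · have hceq : c = k := Nat.le_antisymm hck hkc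
      subst hceq
      simp only [pvNorm, le_refl, if_true, pvSegsFrom, Nat.sub_self]
      rw [if_neg (by omega)]
      simp only [List.nil_append]
      exact ih c hpw' hcle
    · simp only [pvNorm, hck, if_false, pvSegsFrom]
      rw [ih c hpw' hcle]

theorem pv_norm_sorted_mem :
    ∀ (E : List Nat) (k : Nat), E.Pairwise (· ≤ ·) → (∀ x ∈ E, k ≤ x) →
      (pvNorm k E).Pairwise (· < ·) ∧ ∀ p, (p ∈ pvNorm k E ↔ p ∈ E ∧ k < p) := by
  intro E
  induction E with
  | nil => intro k _ _; simp [pvNorm]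
  | cons c E ih =>
    intro k hpw hge
    have hkc : k ≤ c := hge c (by simp)
    have hpw' := (List.pairwise_cons.mp hpw).2
    have hcle := (List.pairwise_cons.mp hpw).1
    by_cases hck : c ≤ k
    · have hceq : c = k := Nat.le_antisymm hck hkc
      subst hceq
      simp only [pvNorm, le_refl, if_true]
      obtain ⟨hs, hm⟩ := ih c hpw' hcle
      refine ⟨hs, fun p => ?_⟩
      rw [hm p]
      constructor
      · rintro ⟨hp, hlt⟩; exact ⟨by simp [hp], hlt⟩
      · rintro ⟨hp, hlt⟩
        rcases List.mem_cons.mp hp with h | h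
        · omega
        · exact ⟨h, hlt⟩
    · have hkc' : k < c := by omega
      simp only [pvNorm, hck, if_false]
      obtain ⟨hs, hm⟩ := ih c hpw' hcle
      constructor
      · rw [List.pairwise_cons]
        exact ⟨fun x hx => ((hm x).mp hx).2, hs⟩
      · intro p
        simp only [List.mem_cons, hm p]
        constructor
        · rintro (h | ⟨hp, hlt⟩)
          · subst h; exact ⟨Or.inl rfl, hkc'⟩
          · exact ⟨Or.inr hp, by omega⟩
        · rintro ⟨h | h, hlt⟩
          · exact Or.inl h
          · have := hcle p h
            rcases Nat.lt_or_ge c p with h' | h'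
            · exact Or.inr ⟨h, h'⟩
            · have : c = p := by omega
              exact Or.inl this.symm

-- B's cut list is sorted, and has the same members as the normalised event list
theorem pv_cuts_sorted (w : List Char) : (pvCuts w).Pairwise (· < ·) := by
  exact List.Pairwise.filter _ (List.pairwise_lt_range' 1)

theorem pv_mem_cuts (w : List Char) (p : Nat) :
    p ∈ pvCuts w ↔ (1 ≤ p ∧ p < 1 + (w.length - 1)) ∧ pvCutP w p = true := by
  simp [pvCuts, List.mem_filter, List.mem_range'_1]

theorem pv_norm_events_eq_cuts (w : List Char) : pvNorm 0 (pvEvents w) = pvCuts w := by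
  obtain ⟨hs, hm⟩ := pv_norm_sorted_mem (pvEvents w) 0 (pv_events_pairwise w) (fun x _ => Nat.zero_le x)
  have hmem : ∀ p, p ∈ pvNorm 0 (pvEvents w) ↔ p ∈ pvCuts w := by
    intro p
    rw [hm p, pv_mem_events, pv_mem_cuts]
    constructor
    · rintro ⟨⟨i, hi, hev⟩, hp⟩
      simp only [pvEvt] at hev
      split_ifs at hev with hA hB
      · have hip : i = p := by simpa using hev
        subst hip
        simp only [Bool.and_eq_true] at hA
        refine ⟨⟨hp, by omega⟩, ?_⟩
        simp only [pvCutP, Bool.and_eq_true, Bool.or_eq_true]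
        exact ⟨hA.1, Or.inr (by simp [hA.2]; omega)⟩
      · have hip : i + 1 = p := by simpa using hev
        simp only [Bool.and_eq_true] at hB
        refine ⟨⟨by omega, by omega⟩, ?_⟩
        simp only [pvCutP, Bool.and_eq_true, Bool.or_eq_true]
        have hp1 : p - 1 = i := by omega
        rw [← hip]
        exact ⟨hB.2, Or.inl (by simpa [hp1, hip] using hB.1)⟩
    · rintro ⟨⟨h1, h2⟩, hcut⟩
      simp only [pvCutP, Bool.and_eq_true, Bool.or_eq_true, decide_eq_true_eq] at hcut
      obtain ⟨hU, hor⟩ := hcut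
      refine ⟨?_, by omega⟩
      rcases hor with hL | ⟨hlt, hL⟩
      · refine ⟨p - 1, by omega, ?_⟩
        simp only [pvEvt]
        have hpp : p - 1 + 1 = p := by omega
        rw [hpp]
        have hnotup : pvU w (p - 1) = false := by
          simp only [pvU]
          exact pv_low_not_up _ hL
        simp [hnotup, hL, hU]
      · refine ⟨p, by omega, ?_⟩
        simp only [pvEvt]
        simp [hU, hL]
  exact List.eq_of_perm_of_sorted (fun a b _ _ hab hba => absurd hba (Nat.lt_asymm hab)) hs (pv_cuts_sorted w)
    ((List.perm_ext_iff_of_nodup (hs.imp Nat.ne_of_lt) ((pv_cuts_sorted w).imp Nat.ne_of_lt)).mpr hmem)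

-- B's zip-of-bounds form is pvSegsFrom
theorem pv_zip_segsFrom (w : List Char) :
    ∀ (E : List Nat) (k : Nat),
      ((((k :: (E ++ [w.length])).zip (E ++ [w.length])).filter (fun ab => decide (2 ≤ ab.2 - ab.1))).map
        (fun ab => pvSeg w ab.1 ab.2)) = pvSegsFrom w k E := by
  intro E
  induction E with
  | nil =>
    intro k
    simp only [List.nil_append, List.zip_cons_cons, pvSegsFrom]
    by_cases h2 : 2 ≤ w.length - k
    · simp [h2]
    · simp [h2]
  | cons c E ih =>
    intro k
    simp only [List.cons_append, List.zip_cons_cons, List.filter_cons, pvSegsFrom]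
    by_cases h2 : 2 ≤ c - k
    · simp only [h2, decide_true, if_true, List.map_cons]
      rw [← ih c]
      simp
    · simp only [h2, decide_false, Bool.false_eq_true, if_false]
      rw [← ih c]
      simp

theorem pv_camelB_eq_segsFrom (run : List Char) : pvCamelB run = pvSegsFrom run 0 (pvCuts run) := by
  rw [← pv_zip_segsFrom run (pvCuts run) 0]
  have hcuts : (PySem.List.pyRange 1 ((run.length : Int))).filter (fun p =>
      pvIsUp (PySem.List.pyGetD run p ' ') &&
      (pvIsLow (PySem.List.pyGetD run (p - 1) ' ') ||
       (decide (p + 1 < (run.length : Int)) && pvIsLow (PySem.List.pyGetD run (p + 1) ' ')))) =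
      (pvCuts run).map (Nat.cast : Nat → Int) := by
    rw [PySem.List.pyRange_one]
    have h1 : ((run.length : Int) - 1).toNat = run.length - 1 := by omega
    rw [h1]
    unfold pvCuts
    rw [List.range'_eq_map_range, List.filter_map, List.filter_map, List.map_map]
    have hpp : ∀ x ∈ List.range (run.length - 1),
        ((fun p => pvIsUp (PySem.List.pyGetD run p ' ') &&
          (pvIsLow (PySem.List.pyGetD run (p - 1) ' ') ||
           (decide (p + 1 < (run.length : Int)) && pvIsLow (PySem.List.pyGetD run (p + 1) ' ')))) ∘
          (fun k : Nat => (1 : Int) + (k : Int))) x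
        = ((pvCutP run) ∘ (fun x : Nat => 1 + x)) x := by
      intro x _
      have e1 : ((1 : Int) + (x : Int)) = (((1 + x : Nat)) : Int) := by push_cast; ring
      have e2 : (((1 + x : Nat)) : Int) - 1 = ((x : Nat) : Int) := by push_cast; ring
      have e3 : (((1 + x : Nat)) : Int) + 1 = (((1 + x + 1 : Nat)) : Int) := by push_cast; ring
      have e4 : (1 + x) - 1 = x := by omega
      simp only [Function.comp_apply, e1, e2, e3, PySem.List.pyGetD_natCast, pvCutP, pvU, pvLo, e4,
        Nat.cast_lt]
    rw [List.filter_congr hpp]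
    apply List.map_congr_left
    intro x _
    simp only [Function.comp_apply]
    push_cast
    ring
  simp only [pvCamelB]
  rw [hcuts, List.tail_cons]
  have hb : ((0 : Int) :: ((pvCuts run).map (Nat.cast : Nat → Int) ++ [(run.length : Int)])) =
      ((0 :: (pvCuts run ++ [run.length])).map (Nat.cast : Nat → Int)) := by
    simp
  have hb2 : ((pvCuts run).map (Nat.cast : Nat → Int) ++ [(run.length : Int)]) =
      ((pvCuts run ++ [run.length]).map (Nat.cast : Nat → Int)) := by
    simp
  rw [hb, hb2, List.zip_map, List.filter_map, List.map_map]
  have hflt : ∀ ab ∈ (0 :: (pvCuts run ++ [run.length])).zip (pvCuts run ++ [run.length]),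
      ((fun ab : Int × Int => decide (2 ≤ ab.2 - ab.1)) ∘ Prod.map (Nat.cast : Nat → Int) (Nat.cast : Nat → Int)) ab
      = (fun ab : Nat × Nat => decide (2 ≤ ab.2 - ab.1)) ab := by
    rintro ⟨a, b⟩ _
    simp only [Function.comp_apply, Prod.map, decide_eq_decide]
    omega
  rw [List.filter_congr hflt]
  apply List.map_congr_left
  rintro ⟨a, b⟩ _
  simp only [Function.comp_apply, Prod.map, PySem.List.slice_natCast, pvSeg]

-- the heart: A's flushed-and-filtered pieces are exactly B's camel tokens
theorem pv_pieces_eq_camelB (w : List Char) (hw : w ≠ []) :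
    (pvPieces w).filter pvLen2 = pvCamelB w := by
  rw [pv_pieces_filter w hw,
    pv_segsFrom_norm w (pvEvents w) 0 (pv_events_pairwise w) (fun x _ => Nat.zero_le x),
    pv_norm_events_eq_cuts w, ← pv_camelB_eq_segsFrom w]

-- a run of letters reaching the end of the input yields no tokens
theorem pv_scan_letters (w : List Char) (hw : ∀ c ∈ w, pvIsLetter c = true) : pvScanB w = [] := by
  cases w with
  | nil => simp [pvScanB]
  | cons a tl =>
    have hdrop : tl.dropWhile pvIsLetter = [] :=
      List.dropWhile_eq_nil_iff.mpr (fun x hx => hw x (by simp [hx]))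
    simp [pvScanB, hw a (by simp), hdrop]

-- skipping a leading delimiter
theorem pv_scan_cons (c : Char) (cs : List Char) (hc : pvIsLetter c = false) :
    pvScanB (c :: cs) = pvScanB cs := by
  rw [show pvScanB (c :: cs) = if pvIsLetter c then
      (if (cs.dropWhile pvIsLetter).isEmpty then []
       else pvCamelB (c :: cs.takeWhile pvIsLetter) ++ pvScanB (cs.dropWhile pvIsLetter))
    else pvScanB cs from by rw [pvScanB]]
  simp [hc]

-- flushing a delimiter-terminated run
theorem pv_scan_flush (w : List Char) (c : Char) (cs : List Char)
    (hwe : w ≠ []) (hw : ∀ x ∈ w, pvIsLetter x = true) (hc : pvIsLetter c = false) :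
    pvScanB (w ++ c :: cs) = pvCamelB w ++ pvScanB cs := by
  cases w with
  | nil => exact absurd rfl hwe
  | cons a tl =>
    have htl : ∀ x ∈ tl, pvIsLetter x = true := fun x hx => hw x (by simp [hx])
    have htake : tl.takeWhile pvIsLetter = tl := List.takeWhile_eq_self_iff.mpr htl
    have hdropn : tl.dropWhile pvIsLetter = [] := List.dropWhile_eq_nil_iff.mpr htl
    have htake2 : (tl ++ c :: cs).takeWhile pvIsLetter = tl := by
      rw [List.takeWhile_append, htake]
      simp [hc]
    have hdrop2 : (tl ++ c :: cs).dropWhile pvIsLetter = c :: cs := by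
      rw [List.dropWhile_append, hdropn]
      simp [hc]
    have ha : pvIsLetter a = true := hw a (by simp)
    rw [List.cons_append]
    rw [show pvScanB (a :: (tl ++ c :: cs)) =
        if pvIsLetter a then
          if ((tl ++ c :: cs).dropWhile pvIsLetter).isEmpty then []
          else pvCamelB (a :: (tl ++ c :: cs).takeWhile pvIsLetter) ++
            pvScanB ((tl ++ c :: cs).dropWhile pvIsLetter)
        else pvScanB (tl ++ c :: cs) from by rw [pvScanB]]
    rw [htake2, hdrop2]
    simp only [ha, if_true, List.isEmpty_cons, Bool.false_eq_true, if_false]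
    rw [pv_scan_cons c cs hc]

-- A's outer loop
theorem pv_outer (chars : List Char) :
    ∀ (P : List (List Char)) (w : List Char),
      (∀ c ∈ w, pvIsLetter c = true) → (∀ p ∈ P, ∀ c ∈ p, pvIsLetter c = true) →
      ∃ Q, (chars.foldl pvStepA (pvMark P, w)).1 = pvMark Q ∧
        (∀ p ∈ Q, ∀ c ∈ p, pvIsLetter c = true) ∧
        Q.filter pvLen2 = P.filter pvLen2 ++ pvScanB (w ++ chars) := by
  induction chars with
  | nil =>
    intro P w hw hP
    refine ⟨P, rfl, hP, ?_⟩
    rw [List.append_nil, pv_scan_letters w hw]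
    simp
  | cons c cs ih =>
    intro P w hw hP
    simp only [List.foldl_cons]
    by_cases hlc : pvIsLetter c = true
    · have hstep : pvStepA (pvMark P, w) c = (pvMark P, w ++ [c]) := by
        simp [pvStepA, hlc]
      rw [hstep]
      have hw' : ∀ x ∈ w ++ [c], pvIsLetter x = true := by
        intro x hx
        rcases List.mem_append.mp hx with h | h
        · exact hw x h
        · simp at h; subst h; exact hlc
      obtain ⟨Q, h1, h2, h3⟩ := ih P (w ++ [c]) hw' hP
      refine ⟨Q, h1, h2, ?_⟩
      rw [h3, List.append_assoc]
      simp
    · have hc : pvIsLetter c = false := by simpa using hlc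
      by_cases hwe : w = []
      · subst hwe
        have hstep : pvStepA (pvMark P, []) c = (pvMark P, []) := by
          simp [pvStepA, hc]
        rw [hstep]
        obtain ⟨Q, h1, h2, h3⟩ := ih P [] (by simp) hP
        refine ⟨Q, h1, h2, ?_⟩
        rw [h3]
        simp [pvScanB, hc]
      · rw [pv_stepA_flush P w c hc hwe]
        have hP' : ∀ p ∈ P ++ pvPieces w, ∀ x ∈ p, pvIsLetter x = true := by
          intro p hp
          rcases List.mem_append.mp hp with h | h
          · exact hP p h
          · exact pv_pieces_letters w hw p h
        obtain ⟨Q, h1, h2, h3⟩ := ih (P ++ pvPieces w) [] (by simp) hP'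
        refine ⟨Q, h1, h2, ?_⟩
        rw [h3, List.filter_append, pv_pieces_eq_camelB w hwe]
        rw [List.append_assoc]
        congr 1
        simp only [List.nil_append]
        rw [pv_scan_flush w c cs hwe hw hc]

-- B's fold at Nat level: one step
theorem pv_stepB_cast (ls : List Char) (T : List (List Char)) (r i : Nat) :
    pvStepB ls (T, (r : Int)) (i : Int) = ((pvNStepB ls (T, r) i).1, ((pvNStepB ls (T, r) i).2 : Int)) := by
  by_cases hl : pvIsLetter (ls[i]?.getD ' ') = true
  · simp [pvStepB, pvNStepB, hl]
  · have hl' : pvIsLetter (ls[i]?.getD ' ') = false := by simpa using hl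
    have hcast : ((i : Int)) + 1 = (((i + 1 : Nat)) : Int) := by push_cast; ring
    simp only [pvStepB, pvNStepB, PySem.List.pyGetD_natCast, List.getD_eq_getElem?_getD, hl',
      Bool.not_false, if_true, Bool.false_eq_true, if_false, PySem.List.slice_natCast, hcast,
      Nat.cast_lt, pvSeg]

theorem pv_stepB_bridge (ls : List Char) :
    ∀ (l : List Nat) (T : List (List Char)) (r : Nat),
      l.foldl (fun st (i : Nat) => pvStepB ls st (i : Int)) (T, (r : Int)) =
        ((l.foldl (pvNStepB ls) (T, r)).1, ((l.foldl (pvNStepB ls) (T, r)).2 : Int)) := by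
  intro l
  induction l with
  | nil => intro T r; simp
  | cons i l ih =>
    intro T r
    simp only [List.foldl_cons]
    rw [pv_stepB_cast ls T r i]
    rcases hst : pvNStepB ls (T, r) i with ⟨T', r'⟩
    exact ih T' r'

-- small segment facts
theorem pv_seg_refl (w : List Char) (r : Nat) : pvSeg w r r = [] := by simp [pvSeg]
theorem pv_seg_succ (w : List Char) (r i : Nat) (hri : r ≤ i) (hi : i < w.length) :
    pvSeg w r (i + 1) = pvSeg w r i ++ [w[i]] := by
  simp only [pvSeg]
  have h1 : i + 1 - r = (i - r) + 1 := by omega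
  rw [h1, List.take_succ]
  congr 1
  have h2 : (w.drop r)[i - r]? = w[i]? := by
    rw [List.getElem?_drop]
    congr 1
    omega
  rw [h2, List.getElem?_eq_getElem hi]
  rfl

-- B's Nat-level fold computes the scanner over the pending run plus the remaining characters
theorem pv_fold_scanB (ls : List Char) :
    ∀ (m i : Nat) (T : List (List Char)) (r : Nat), i + m = ls.length → r ≤ i →
      (∀ c ∈ pvSeg ls r i, pvIsLetter c = true) →
      ((List.range' i m).foldl (pvNStepB ls) (T, r)).1 = T ++ pvScanB (pvSeg ls r i ++ ls.drop i) := by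
  intro m
  induction m with
  | zero =>
    intro i T r hlen hri hlet
    have hdrop : ls.drop i = [] := List.drop_of_length_le (by omega)
    simp only [List.range'_zero, List.foldl_nil, hdrop, List.append_nil]
    rw [pv_scan_letters _ hlet, List.append_nil]
  | succ m ih =>
    intro i T r hlen hri hlet
    have hi : i < ls.length := by omega
    have hgetD : ls[i]? = some ls[i] := List.getElem?_eq_getElem hi
    have hdropi : ls.drop i = ls[i] :: ls.drop (i + 1) := List.drop_eq_getElem_cons hi
    rw [List.range'_succ, List.foldl_cons]
    by_cases hl : pvIsLetter ls[i] = true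
    · have hstep : pvNStepB ls (T, r) i = (T, r) := by simp [pvNStepB, hgetD, hl]
      rw [hstep, ih (i + 1) T r (by omega) (by omega)
        (by intro x hx
            rw [pv_seg_succ ls r i hri hi] at hx
            rcases List.mem_append.mp hx with h | h
            · exact hlet x h
            · simp at h; subst h; exact hl)]
      rw [pv_seg_succ ls r i hri hi, hdropi, List.append_assoc, List.singleton_append]
    · have hl' : pvIsLetter ls[i] = false := by simpa using hl
      have hstep : pvNStepB ls (T, r) i =
          ((if r < i then T ++ pvCamelB (pvSeg ls r i) else T), i + 1) := by
        simp [pvNStepB, hgetD, hl']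
      rw [hstep, ih (i + 1) _ (i + 1) (by omega) le_rfl (by simp [pv_seg_refl])]
      rw [pv_seg_refl, List.nil_append, hdropi]
      by_cases hlt : r < i
      · have hwne : pvSeg ls r i ≠ [] := by
          have hlenr := pv_seg_length ls r i (Nat.le_of_lt hi)
          intro h
          rw [h] at hlenr
          simp at hlenr
          omega
        rw [if_pos hlt, pv_scan_flush (pvSeg ls r i) ls[i] (ls.drop (i + 1)) hwne hlet hl',
          List.append_assoc]
      · have hreq : r = i := by omega
        subst hreq
        rw [if_neg hlt, pv_seg_refl, List.nil_append, pv_scan_cons ls[r] _ hl']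

-- B's port evaluates to the scanner
theorem pv_alt_eq_scan (s : String) :
    code_splitter_alt s = (pvScanB s.toList).map (fun t => String.ofList t) := by
  unfold code_splitter_alt
  rw [PySem.List.pyRange_zero_natCast, List.foldl_map]
  have h0 : (([], (0 : Int)) : List (List Char) × Int) = ([], ((0 : Nat) : Int)) := rfl
  rw [h0, pv_stepB_bridge s.toList (List.range s.toList.length) [] 0,
    List.range_eq_range',
    pv_fold_scanB s.toList s.toList.length 0 [] 0 (by omega) le_rfl (by simp [pv_seg_refl]),
    pv_seg_refl, List.nil_append, List.drop_zero, List.nil_append]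

-- ===== VERDICT (by name: the statement is the Claim_ definition above) =====
theorem code_splitter_spec : Claim_equal_code_splitter := by
  intro s _
  unfold Spec_code_splitter
  obtain ⟨Q, h1, h2, h3⟩ := pv_outer s.toList [] [] (by simp) (by simp)
  have h1' : (s.toList.foldl pvStepA ([], [])).1 = pvMark Q := h1
  have h3' : Q.filter pvLen2 = pvScanB s.toList := by simpa using h3
  rw [pv_alt_eq_scan]
  unfold code_splitter
  simp only []
  rw [PySem.List.foldl_append_eq_flatten, List.nil_append, h1', pv_split_mark Q h2]
  rw [PySem.List.foldl_pyRange_zero_pyGetD' (List.filter (fun p => !p.isEmpty) Q) []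
    (fun acc wi => if !(PySem.Chars.strip wi).isEmpty && decide (2 ≤ wi.length) then acc ++ [wi] else acc) []]
  rw [PySem.List.foldl_append_if_eq_filter, List.nil_append, pv_filters_collapse Q h2, h3']
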